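-- pv_equiv track=rewrite | github.com/neilmarshall/Project_Euler | 116/PE_116.py | substitutions_using_tiles_of_one_color
-- ===== SOURCE A (Python) =====
-- def substitutions_using_tiles_of_one_color(total_tiles, color_length):
--     substitutions = [[0 for i in range(total_tiles // color_length + 1)] for _ in range(total_tiles + 1)]
--     for r in range(color_length, total_tiles + 1):
--         substitutions[r][1] = r - color_length + 1
--     for c in range(2, total_tiles // color_length + 1):
--         for r in range(color_length * c, total_tiles + 1):
--             substitutions[r][c] = sum(substitutions[i][c - 1] for i in range(color_length * (c - 1), r - color_length + 1))
--     return sum(substitutions[total_tiles])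
-- ===== SOURCE B (Python) =====
-- def substitutions_using_tiles_of_one_color(total_tiles, color_length):
--     # Linear recurrence: ways(n) = ways(n-1) + ways(n-L) + 1 for n >= L, else 0.
--     ways = []
--     for n in range(total_tiles + 1):
--         if n < color_length:
--             ways.append(0)
--         else:
--             ways.append(ways[n - 1] + ways[n - color_length] + 1)
--     return ways[total_tiles]
-- ===== Notes on version B (the rewrite author's own statement) =====
-- stated objective: faster
-- what changed: Replaces the 2-D DP table over (row, tile-count) with inner summation scans by the one-dimensional linear recurrence f(n)=f(n-1)+f(n-L)+1, computed in a single pass.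
import Mathlib
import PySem

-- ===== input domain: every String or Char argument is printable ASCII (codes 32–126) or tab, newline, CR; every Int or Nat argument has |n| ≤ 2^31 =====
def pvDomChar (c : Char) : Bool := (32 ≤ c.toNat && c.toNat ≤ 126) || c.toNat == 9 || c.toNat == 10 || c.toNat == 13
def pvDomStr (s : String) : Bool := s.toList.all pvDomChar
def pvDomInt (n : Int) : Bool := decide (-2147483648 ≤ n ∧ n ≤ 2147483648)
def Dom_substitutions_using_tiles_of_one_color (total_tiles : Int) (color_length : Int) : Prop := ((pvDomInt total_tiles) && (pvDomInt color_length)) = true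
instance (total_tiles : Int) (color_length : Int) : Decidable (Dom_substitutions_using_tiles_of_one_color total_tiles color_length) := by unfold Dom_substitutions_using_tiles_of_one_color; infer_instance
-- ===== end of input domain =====

-- B replaces A's 2-D DP table (with an inner summation scan per cell) by the one-pass
-- linear recurrence f(n) = f(n-1) + f(n-L) + 1; objective: faster (asymptotic).

-- ===== PORT A =====
def substitutions_using_tiles_of_one_color (total_tiles : Int) (color_length : Int) : Int :=
  let substitutions : List (List Int) :=
    (PySem.List.pyRange 0 (total_tiles + 1) 1).map (fun _ =>
      (PySem.List.pyRange 0 (PySem.Int.floordiv total_tiles color_length + 1) 1).map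
        (fun _ => (0 : Int)))
  let substitutions :=
    (PySem.List.pyRange color_length (total_tiles + 1) 1).foldl (fun tbl r =>
      PySem.List.pySetD tbl r
        (PySem.List.pySetD (PySem.List.pyGetD tbl r []) 1 (r - color_length + 1))) substitutions
  let substitutions :=
    (PySem.List.pyRange 2 (PySem.Int.floordiv total_tiles color_length + 1) 1).foldl (fun tbl c =>
      (PySem.List.pyRange (color_length * c) (total_tiles + 1) 1).foldl (fun tbl r =>
        PySem.List.pySetD tbl r
          (PySem.List.pySetD (PySem.List.pyGetD tbl r []) c
            (((PySem.List.pyRange (color_length * (c - 1)) (r - color_length + 1) 1).map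
                (fun i => PySem.List.pyGetD (PySem.List.pyGetD tbl i []) (c - 1) (0 : Int))).sum)))
        tbl) substitutions
  (PySem.List.pyGetD substitutions total_tiles []).sum

-- ===== PORT B =====
def substitutions_using_tiles_of_one_color_alt (total_tiles : Int) (color_length : Int) : Int :=
  let ways : List Int :=
    (PySem.List.pyRange 0 (total_tiles + 1) 1).foldl (fun ways n =>
      if n < color_length then ways ++ [(0 : Int)]
      else ways ++ [PySem.List.pyGetD ways (n - 1) 0 +
                    PySem.List.pyGetD ways (n - color_length) 0 + 1]) []
  PySem.List.pyGetD ways total_tiles 0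

-- ===== PRECONDITION & SPEC =====
-- Pre_ excludes exactly the inputs where Python A raises (IndexError for total_tiles < 0 or
-- color_length < 0, ZeroDivisionError for color_length = 0); B raises there as well.
def Pre_substitutions_using_tiles_of_one_color (total_tiles : Int) (color_length : Int) : Prop :=
  0 ≤ total_tiles ∧ 1 ≤ color_length
instance (total_tiles : Int) (color_length : Int) : Decidable (Pre_substitutions_using_tiles_of_one_color total_tiles color_length) := by unfold Pre_substitutions_using_tiles_of_one_color; infer_instance

def pvWitness_substitutions_using_tiles_of_one_color : Int × Int := (6, 3)

def Spec_substitutions_using_tiles_of_one_color (total_tiles : Int) (color_length : Int) (out : Int) : Prop := out = substitutions_using_tiles_of_one_color_alt total_tiles color_length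
instance (total_tiles : Int) (color_length : Int) (out : Int) : Decidable (Spec_substitutions_using_tiles_of_one_color total_tiles color_length out) := by unfold Spec_substitutions_using_tiles_of_one_color; infer_instance

-- ===== CLAIM (what is proved, stated in full; the proofs are below) =====
def Claim_equal_substitutions_using_tiles_of_one_color : Prop := ∀ (total_tiles : Int) (color_length : Int), Dom_substitutions_using_tiles_of_one_color total_tiles color_length → Pre_substitutions_using_tiles_of_one_color total_tiles color_length → Spec_substitutions_using_tiles_of_one_color total_tiles color_length (substitutions_using_tiles_of_one_color total_tiles color_length)

-- ===== LEMMAS AND PROOFS =====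

-- pvS l c r : value of A's table cell (r, c) = #ways to place exactly c tiles of length l
-- in a row of length r (same inner-sum recursion A's second loop uses).
def pvS (l : Nat) : Nat → Int → Int
  | 0, _ => 1
  | 1, r => if (l : Int) ≤ r then r - l + 1 else 0
  | (c + 2), r =>
      if ((c + 2) * l : Nat) ≤ r then
        ((PySem.List.pyRange ((c + 1) * l : Nat) (r - l + 1) 1).map (pvS l (c + 1))).sum
      else 0

-- total over all tile counts ≥ 1
def pvT (l N : Nat) : Int := ∑ j ∈ Finset.range N, pvS l (j + 1) (N : Int)

-- B's linear recurrence
def pvF (l : Nat) (n : Nat) : Int :=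
  if h : n < l ∨ l = 0 then 0 else pvF l (n - 1) + pvF l (n - l) + 1
termination_by n
decreasing_by all_goals omega

-- A's table as a function of (row, column)
def pvMk (n q : Nat) (f : Nat → Nat → Int) : List (List Int) :=
  (List.range (n + 1)).map (fun r => (List.range (q + 1)).map (fun c => f r c))

-- table state with columns 1 .. K-1 filled
def pvG (l K : Nat) (r c : Nat) : Int := if 1 ≤ c ∧ c < K then pvS l c (r : Int) else 0

theorem pvS_eq_zero {l : Nat} {c : Nat} {r : Int} (hc : 1 ≤ c) (h : r < (c * l : Nat)) :
    pvS l c r = 0 := by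
  match c, hc with
  | 1, _ => simp only [pvS]; rw [if_neg]; push_cast at h ⊢; omega
  | (c + 2), _ => simp only [pvS]; rw [if_neg]; omega

theorem pvS_step {l : Nat} {c : Nat} (hc : 1 ≤ c) (r : Int) :
    pvS l c (r + 1) = pvS l c r + (if ((c * l : Nat) : Int) ≤ r + 1 then pvS l (c - 1) (r + 1 - l) else 0) := by
  match c, hc with
  | 1, _ =>
    simp only [pvS]
    split_ifs <;> push_cast at * <;> omega
  | (c + 2), _ =>
    by_cases h : (((c + 2) * l : Nat) : Int) ≤ r + 1
    · rw [if_pos h]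
      simp only [pvS]
      rw [if_pos h]
      have hmul : ((c + 2) * l : Nat) = (c + 1) * l + l := by ring
      have he : r + 1 - (l : Int) + 1 = (r - l + 1) + 1 := by ring
      have ha : (((c + 1) * l : Nat) : Int) ≤ r - l + 1 := by
        rw [hmul] at h; push_cast at h ⊢; omega
      rw [he, PySem.List.pyRange_one_succ_right ha, List.map_append, List.sum_append,
          show r + 1 - (l : Int) = r - l + 1 from by ring]
      simp only [List.map_cons, List.map_nil, List.sum_cons, List.sum_nil, add_zero]
      by_cases h2 : (((c + 2) * l : Nat) : Int) ≤ r
      · rw [if_pos h2]; norm_num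
      · have hnil : PySem.List.pyRange (((c + 1) * l : Nat) : Int) (r - l + 1) 1 = [] := by
          apply PySem.List.pyRange_one_eq_nil
          rw [hmul] at h2; push_cast at h2 ⊢; omega
        rw [if_neg h2, hnil]; norm_num
    · rw [if_neg h]
      have z1 : pvS l (c + 2) (r + 1) = 0 := pvS_eq_zero (by omega) (by omega)
      have z2 : pvS l (c + 2) r = 0 := pvS_eq_zero (by omega) (by omega)
      rw [z1, z2]; ring

theorem pvT_aux {l : Nat} {B B' M : Nat} (hBB : B ≤ B') (h : (M : Int) < ((B : Int) + 1) * l) :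
    ∑ j ∈ Finset.range B', pvS l (j + 1) (M : Int) = ∑ j ∈ Finset.range B, pvS l (j + 1) (M : Int) := by
  have hsub : Finset.range B ⊆ Finset.range B' := by
    intro x hx; simp only [Finset.mem_range] at hx ⊢; omega
  refine (Finset.sum_subset hsub ?_).symm
  intro j _ hj
  simp only [Finset.mem_range, not_lt] at hj
  apply pvS_eq_zero (by omega)
  have hN : M < (B + 1) * l := by exact_mod_cast h
  have h2 : (B + 1) * l ≤ (j + 1) * l := Nat.mul_le_mul_right _ (by omega)
  exact_mod_cast (by omega : M < (j + 1) * l)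

theorem pvT_pad {l B M : Nat} (hl : 1 ≤ l) (h : (M : Int) < ((B : Int) + 1) * l) :
    ∑ j ∈ Finset.range B, pvS l (j + 1) (M : Int) = pvT l M := by
  have hMn : M < (M + 1) * l := Nat.lt_of_lt_of_le (Nat.lt_succ_self M) (Nat.le_mul_of_pos_right _ hl)
  have hM : (M : Int) < ((M : Int) + 1) * l := by exact_mod_cast hMn
  rcases le_total B M with hbm | hmb
  · rw [pvT, pvT_aux hbm h]
  · rw [pvT, pvT_aux hmb hM]

theorem pvT_rec {l N : Nat} (hl : 1 ≤ l) (hN : l ≤ N) :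
    pvT l N = pvT l (N - 1) + pvT l (N - l) + 1 := by
  have hN1 : 1 ≤ N := le_trans hl hN
  have hstep : ∀ j : Nat, pvS l (j + 1) (N : Int) =
      pvS l (j + 1) ((N - 1 : Nat) : Int) +
        (if (((j + 1) * l : Nat) : Int) ≤ (N : Int) then pvS l j (((N - l : Nat) : Int)) else 0) := by
    intro j
    have h := pvS_step (l := l) (c := j + 1) (by omega) (((N - 1 : Nat) : Int))
    have e1 : ((N - 1 : Nat) : Int) + 1 = (N : Int) := by push_cast [hN1]; ring
    have e2 : ((N - 1 : Nat) : Int) + 1 - (l : Int) = ((N - l : Nat) : Int) := by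
      push_cast [hN1, hN]; ring
    rw [e2, e1] at h
    simpa using h
  rw [pvT, Finset.sum_congr rfl (fun j _ => hstep j), Finset.sum_add_distrib]
  have hs1 : ∑ j ∈ Finset.range N, pvS l (j + 1) ((N - 1 : Nat) : Int) = pvT l (N - 1) := by
    apply pvT_pad hl
    have : (N - 1 : Nat) < (N + 1) * l := by
      have := Nat.le_mul_of_pos_right (N + 1) hl; omega
    exact_mod_cast this
  have hs2 : ∀ j ∈ Finset.range N,
      (if (((j + 1) * l : Nat) : Int) ≤ (N : Int) then pvS l j (((N - l : Nat) : Int)) else 0)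
        = pvS l j (((N - l : Nat) : Int)) := by
    intro j _
    by_cases hc : (((j + 1) * l : Nat) : Int) ≤ (N : Int)
    · rw [if_pos hc]
    · rw [if_neg hc]
      have hcn : N < (j + 1) * l := by exact_mod_cast not_le.mp hc
      have hj1 : 1 ≤ j := by
        rcases Nat.eq_zero_or_pos j with rfl | h
        · simp at hcn; omega
        · omega
      symm
      apply pvS_eq_zero hj1
      have hmul : (j + 1) * l = j * l + l := by ring
      have : (N - l : Nat) < j * l := by omega
      exact_mod_cast this
  rw [Finset.sum_congr rfl hs2]
  have hsplit := Finset.sum_range_succ' (fun j => pvS l j (((N - l : Nat) : Int))) (N - 1)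
  have hNe : N - 1 + 1 = N := by omega
  rw [hNe] at hsplit
  rw [hsplit]
  have hs3 : ∑ i ∈ Finset.range (N - 1), pvS l (i + 1) (((N - l : Nat) : Int)) = pvT l (N - l) := by
    apply pvT_pad hl
    have : (N - l : Nat) < (N - 1 + 1) * l := by
      have := Nat.le_mul_of_pos_right (N - 1 + 1) hl; omega
    exact_mod_cast this
  rw [hs3, hs1]
  simp [pvS]
  ring

theorem pvF_eq_pvT {l : Nat} (hl : 1 ≤ l) (n : Nat) : pvF l n = pvT l n := by
  induction n using Nat.strong_induction_on with
  | _ n ih =>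
    rw [pvF]
    by_cases h : n < l
    · rw [dif_pos (Or.inl h)]
      symm
      apply Finset.sum_eq_zero
      intro j hj
      apply pvS_eq_zero (by omega)
      have : n < (j + 1) * l := lt_of_lt_of_le h (Nat.le_mul_of_pos_left _ (by omega))
      exact_mod_cast this
    · have hln : l ≤ n := by omega
      have h1 : pvF l (n - 1) = pvT l (n - 1) := ih (n - 1) (by omega)
      have h2 : pvF l (n - l) = pvT l (n - l) := ih (n - l) (by omega)
      rw [dif_neg (by omega), h1, h2, pvT_rec (N := n) hl hln]

-- table helpers
theorem pvMk_congr {n q : Nat} {f f' : Nat → Nat → Int}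
    (h : ∀ r c, r ≤ n → c ≤ q → f r c = f' r c) : pvMk n q f = pvMk n q f' := by
  unfold pvMk
  apply List.map_congr_left
  intro r hr
  apply List.map_congr_left
  intro c hc
  simp only [List.mem_range] at hr hc
  exact h r c (by omega) (by omega)

theorem pvMk_row {n q : Nat} (f : Nat → Nat → Int) {r : Nat} (hr : r ≤ n) :
    PySem.List.pyGetD (pvMk n q f) (r : Int) [] = (List.range (q + 1)).map (f r) := by
  rw [PySem.List.pyGetD_natCast]
  unfold pvMk
  exact PySem.List.getD_map_range _ _ _ _ (by omega)

theorem pvMk_get {n q : Nat} (f : Nat → Nat → Int) {i : Int} (h0 : 0 ≤ i) (hn : i ≤ (n : Int))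
    {c : Nat} (hc : c ≤ q) :
    PySem.List.pyGetD (PySem.List.pyGetD (pvMk n q f) i []) (c : Int) 0 = f i.toNat c := by
  obtain ⟨r, rfl⟩ : ∃ r : Nat, i = (r : Int) := ⟨i.toNat, (Int.toNat_of_nonneg h0).symm⟩
  rw [pvMk_row f (by exact_mod_cast hn), PySem.List.pyGetD_natCast]
  simp only [Int.toNat_natCast]
  exact PySem.List.getD_map_range _ _ _ _ (by omega)

theorem pv_set_map_range {α : Type} (N i : Nat) (g : Nat → α) (x : α) (hi : i < N) :
    ((List.range N).map g).set i x = (List.range N).map (fun j => if j = i then x else g j) := by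
  apply List.ext_getElem (by simp)
  intro k h1 h2
  simp only [List.length_map, List.length_range] at h1 h2
  rw [List.getElem_set]
  simp only [List.getElem_map, List.getElem_range]
  split_ifs with ha hb hb
  · rfl
  · omega
  · omega
  · rfl

theorem pvMk_set {n q : Nat} (f : Nat → Nat → Int) {r c : Nat} (hr : r ≤ n) (hc : c ≤ q) (v : Int) :
    PySem.List.pySetD (pvMk n q f) (r : Int)
      (PySem.List.pySetD (PySem.List.pyGetD (pvMk n q f) (r : Int) []) (c : Int) v)
      = pvMk n q (fun r' c' => if r' = r ∧ c' = c then v else f r' c') := by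
  rw [pvMk_row f hr, PySem.List.pySetD_natCast, PySem.List.pySetD_natCast,
      pv_set_map_range _ c _ _ (by omega)]
  unfold pvMk
  rw [pv_set_map_range _ r _ _ (by omega)]
  apply List.map_congr_left
  intro r' hr'
  by_cases h : r' = r
  · subst h; rw [if_pos rfl]
    apply List.map_congr_left
    intro c' _
    by_cases h2 : c' = c
    · subst h2; simp
    · simp [h2]
  · rw [if_neg h]
    apply List.map_congr_left
    intro c' _
    simp [h]

theorem pvA_init (n q : Nat) :
    (PySem.List.pyRange 0 ((n : Int) + 1) 1).map (fun _ =>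
      (PySem.List.pyRange 0 ((q : Int) + 1) 1).map (fun _ => (0 : Int)))
    = pvMk n q (fun _ _ => 0) := by
  have h1 : ((n : Int) + 1) = ((n + 1 : Nat) : Int) := by push_cast; ring
  have h2 : ((q : Int) + 1) = ((q + 1 : Nat) : Int) := by push_cast; ring
  rw [h1, h2, PySem.List.pyRange_zero_nat, PySem.List.pyRange_zero_nat]
  unfold pvMk
  simp only [List.map_map]
  rfl

theorem pvA_loop1 {n q l : Nat} (hl : 1 ≤ l) (hq : q = n / l) :
    ∀ m : Nat, m ≤ n + 1 →
    (PySem.List.pyRange (l : Int) (m : Int) 1).foldl (fun tbl r =>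
        PySem.List.pySetD tbl r
          (PySem.List.pySetD (PySem.List.pyGetD tbl r []) 1 (r - (l : Int) + 1)))
      (pvMk n q (fun _ _ => 0))
    = pvMk n q (fun r c => if c = 1 ∧ l ≤ r ∧ r < m then (r : Int) - l + 1 else 0) := by
  intro m
  induction m with
  | zero =>
    intro _
    rw [PySem.List.pyRange_one_eq_nil (by exact_mod_cast Nat.zero_le l)]
    simp only [List.foldl_nil]
    apply pvMk_congr; intro r c _ _; rw [if_neg (by omega)]
  | succ m ih =>
    intro hm
    by_cases hml : m < l
    · rw [PySem.List.pyRange_one_eq_nil (by exact_mod_cast hml)]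
      simp only [List.foldl_nil]
      apply pvMk_congr; intro r c _ _; rw [if_neg (by omega)]
    · have hlm : (l : Int) ≤ (m : Int) := by exact_mod_cast not_lt.mp hml
      have hcast : ((m + 1 : Nat) : Int) = (m : Int) + 1 := by push_cast; ring
      rw [hcast, PySem.List.pyRange_one_succ_right hlm, List.foldl_append, ih (by omega)]
      simp only [List.foldl_cons, List.foldl_nil]
      have hq1 : 1 ≤ q := by rw [hq]; exact (Nat.one_le_div_iff (by omega)).mpr (by omega)
      rw [show (1 : Int) = ((1 : Nat) : Int) from by norm_num,
          pvMk_set _ (show m ≤ n by omega) hq1 _]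
      apply pvMk_congr
      intro r c hr hc
      by_cases h : r = m ∧ c = 1
      · obtain ⟨rfl, rfl⟩ := h
        rw [if_pos ⟨rfl, rfl⟩, if_pos (by omega)]
      · rw [if_neg h]
        split_ifs with h1 h2 <;> first | rfl | omega

theorem pvA_loop2 {n q l : Nat} (hl : 1 ≤ l) (hq : q = n / l) {c : Nat} (hc2 : 2 ≤ c) (hcq : c ≤ q) :
    ∀ m : Nat, m ≤ n + 1 →
    (PySem.List.pyRange ((l : Int) * (c : Int)) (m : Int) 1).foldl (fun tbl r =>
        PySem.List.pySetD tbl r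
          (PySem.List.pySetD (PySem.List.pyGetD tbl r []) (c : Int)
            (((PySem.List.pyRange ((l : Int) * ((c : Int) - 1)) (r - (l : Int) + 1) 1).map
                (fun i => PySem.List.pyGetD (PySem.List.pyGetD tbl i []) ((c : Int) - 1) (0 : Int))).sum)))
      (pvMk n q (pvG l c))
    = pvMk n q (fun r c' => if c' = c ∧ r < m then pvS l c (r : Int) else pvG l c r c') := by
  intro m
  induction m with
  | zero =>
    intro _
    rw [PySem.List.pyRange_one_eq_nil (by positivity)]
    simp only [List.foldl_nil]
    apply pvMk_congr; intro r c' _ _; rw [if_neg (by omega)]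
  | succ m ih =>
    intro hm
    by_cases hml : m < l * c
    · rw [PySem.List.pyRange_one_eq_nil (by exact_mod_cast hml)]
      simp only [List.foldl_nil]
      symm; apply pvMk_congr
      intro r c' hr _
      by_cases h : c' = c ∧ r < m + 1
      · rw [if_pos h]
        rw [pvS_eq_zero (by omega) (by exact_mod_cast (show r < c * l by have := Nat.mul_comm l c; omega)), h.1]
        rw [pvG, if_neg (by omega)]
      · rw [if_neg h]
    · have hlcm : l * c ≤ m := not_lt.mp hml
      have hlm : ((l : Int) * (c : Int)) ≤ (m : Int) := by exact_mod_cast hlcm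
      have hcast : ((m + 1 : Nat) : Int) = (m : Int) + 1 := by push_cast; ring
      rw [hcast, PySem.List.pyRange_one_succ_right hlm, List.foldl_append, ih (by omega)]
      simp only [List.foldl_cons, List.foldl_nil]
      have hmn : m ≤ n := by omega
      -- the inner sum reads only columns < c, which the invariant says hold pvS values
      have hsum : ((PySem.List.pyRange ((l : Int) * ((c : Int) - 1)) ((m : Int) - (l : Int) + 1) 1).map
          (fun i => PySem.List.pyGetD (PySem.List.pyGetD
            (pvMk n q (fun r c' => if c' = c ∧ r < m then pvS l c (r : Int) else pvG l c r c')) i [])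
            ((c : Int) - 1) (0 : Int))).sum
          = pvS l c (m : Int) := by
        have hmap : ∀ i ∈ PySem.List.pyRange ((l : Int) * ((c : Int) - 1)) ((m : Int) - (l : Int) + 1) 1,
            PySem.List.pyGetD (PySem.List.pyGetD
              (pvMk n q (fun r c' => if c' = c ∧ r < m then pvS l c (r : Int) else pvG l c r c')) i [])
              ((c : Int) - 1) (0 : Int) = pvS l (c - 1) i := by
          intro i hi
          rw [PySem.List.mem_pyRange_one] at hi
          have h0 : 0 ≤ i := by
            have hc1 : (1 : Int) ≤ (c : Int) := by exact_mod_cast (show 1 ≤ c by omega)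
            have := mul_nonneg (show (0:Int) ≤ (l:Int) by positivity) (show (0:Int) ≤ (c:Int) - 1 by omega)
            omega
          have hin : i ≤ (n : Int) := by
            have h1 : i < (m : Int) - (l : Int) + 1 := hi.2
            have : (m : Int) ≤ (n : Int) := by exact_mod_cast hmn
            omega
          rw [show ((c : Int) - 1) = ((c - 1 : Nat) : Int) from by omega,
              pvMk_get _ h0 hin (by omega)]
          rw [if_neg (by omega), pvG, if_pos (by omega)]
          congr 1
          exact Int.toNat_of_nonneg h0
        rw [List.map_congr_left hmap]
        obtain ⟨c'', rfl⟩ : ∃ c'', c = c'' + 2 := ⟨c - 2, by omega⟩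
        have hse : pvS l (c'' + 2) (m : Int)
            = ((PySem.List.pyRange ((c'' + 1) * l : Nat) ((m : Int) - l + 1) 1).map (pvS l (c'' + 1))).sum := by
          simp only [pvS]
          rw [if_pos (by exact_mod_cast (show (c'' + 2) * l ≤ m by have := Nat.mul_comm l (c'' + 2); omega))]
        rw [hse, show ((l : Int) * (((c'' + 2 : Nat) : Int) - 1)) = (((c'' + 1) * l : Nat) : Int) from by push_cast; ring,
            show ((c'' + 2 : Nat) - 1) = c'' + 1 from by omega]
      rw [hsum, pvMk_set _ hmn (by omega) _]
      apply pvMk_congr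
      intro r c' hr hc'
      by_cases h : r = m ∧ c' = c
      · obtain ⟨rfl, rfl⟩ := h
        rw [if_pos ⟨rfl, rfl⟩, if_pos (by omega)]
      · rw [if_neg h]
        split_ifs with h1 h2 <;> first | rfl | omega

theorem pvA_loop3 {n q l : Nat} (hl : 1 ≤ l) (hq : q = n / l) :
    ∀ K : Nat, 2 ≤ K → K ≤ q + 1 →
    (PySem.List.pyRange 2 (K : Int) 1).foldl (fun tbl c =>
        (PySem.List.pyRange ((l : Int) * c) ((n : Int) + 1) 1).foldl (fun tbl r =>
          PySem.List.pySetD tbl r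
            (PySem.List.pySetD (PySem.List.pyGetD tbl r []) c
              (((PySem.List.pyRange ((l : Int) * (c - 1)) (r - (l : Int) + 1) 1).map
                  (fun i => PySem.List.pyGetD (PySem.List.pyGetD tbl i []) (c - 1) (0 : Int))).sum)))
          tbl)
      (pvMk n q (pvG l 2))
    = pvMk n q (pvG l K) := by
  intro K hK2
  induction K, hK2 using Nat.le_induction with
  | base =>
    intro _
    rw [show ((2 : Nat) : Int) = 2 from by norm_num, PySem.List.pyRange_one_eq_nil (by omega)]
    simp only [List.foldl_nil]
  | succ K hK ihK =>
    intro hK1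
    have hcast : ((K + 1 : Nat) : Int) = (K : Int) + 1 := by push_cast; ring
    rw [hcast, PySem.List.pyRange_one_succ_right (by exact_mod_cast hK), List.foldl_append,
        ihK (by omega)]
    simp only [List.foldl_cons, List.foldl_nil]
    have hinner := pvA_loop2 hl hq (c := K) hK (by omega) (n + 1) (le_refl _)
    rw [show ((n + 1 : Nat) : Int) = (n : Int) + 1 from by push_cast; ring] at hinner
    rw [hinner]
    apply pvMk_congr
    intro r c' hr hc'
    by_cases h : c' = K
    · subst h
      rw [if_pos ⟨rfl, by omega⟩, pvG, if_pos (by omega)]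
    · rw [if_neg (by tauto)]
      unfold pvG
      split_ifs with h1 h2 <;> first | rfl | omega

theorem alt_loop {l : Nat} (hl : 1 ≤ l) (m : Nat) :
    (PySem.List.pyRange 0 (m : Int) 1).foldl (fun ways n' =>
      if n' < (l : Int) then ways ++ [(0 : Int)]
      else ways ++ [PySem.List.pyGetD ways (n' - 1) 0 +
                    PySem.List.pyGetD ways (n' - (l : Int)) 0 + 1]) []
    = (List.range m).map (pvF l) := by
  induction m with
  | zero =>
    rw [show ((0 : Nat) : Int) = 0 from rfl, PySem.List.pyRange_one_eq_nil (by omega)]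
    rfl
  | succ m ih =>
    rw [show ((m + 1 : Nat) : Int) = (m : Int) + 1 from by push_cast; ring,
        PySem.List.pyRange_one_succ_right (by exact_mod_cast Nat.zero_le m),
        List.foldl_append, ih]
    simp only [List.foldl_cons, List.foldl_nil]
    rw [List.range_succ, List.map_append]
    by_cases h : m < l
    · rw [if_pos (by exact_mod_cast h)]
      simp only [List.map_cons, List.map_nil]
      rw [show pvF l m = 0 from by rw [pvF, dif_pos (Or.inl h)]]
    · rw [if_neg (by exact_mod_cast h)]
      have e1 : (m : Int) - 1 = ((m - 1 : Nat) : Int) := by omega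
      have e2 : (m : Int) - (l : Int) = ((m - l : Nat) : Int) := by omega
      rw [e1, e2, PySem.List.pyGetD_natCast, PySem.List.pyGetD_natCast,
          PySem.List.getD_map_range _ _ _ _ (by omega),
          PySem.List.getD_map_range _ _ _ _ (by omega)]
      simp only [List.map_cons, List.map_nil]
      rw [show pvF l m = pvF l (m - 1) + pvF l (m - l) + 1 from by
        rw [pvF, dif_neg (by omega)]]

theorem alt_eq_pvF {n l : Nat} (hl : 1 ≤ l) :
    substitutions_using_tiles_of_one_color_alt (n : Int) (l : Int) = pvF l n := by
  simp only [substitutions_using_tiles_of_one_color_alt]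
  rw [show ((n : Int) + 1) = ((n + 1 : Nat) : Int) from by push_cast; ring,
      alt_loop hl (n + 1), PySem.List.pyGetD_natCast,
      PySem.List.getD_map_range _ _ _ _ (by omega)]

theorem a_eq_pvT {n l : Nat} (hl : 1 ≤ l) :
    substitutions_using_tiles_of_one_color (n : Int) (l : Int) = pvT l n := by
  simp only [substitutions_using_tiles_of_one_color]
  rw [PySem.Int.floordiv_natCast, pvA_init n (n / l)]
  have L1 := pvA_loop1 (q := n / l) hl rfl (n + 1) (le_refl _)
  rw [show ((n + 1 : Nat) : Int) = (n : Int) + 1 from by push_cast; ring] at L1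
  rw [L1]
  have hG2 : pvMk n (n / l) (fun r c => if c = 1 ∧ l ≤ r ∧ r < n + 1 then (r : Int) - l + 1 else 0)
      = pvMk n (n / l) (pvG l 2) := by
    apply pvMk_congr
    intro r c hr hc
    unfold pvG
    by_cases h : c = 1
    · subst h
      rw [if_pos (show (1 : Nat) ≤ 1 ∧ 1 < 2 by omega)]
      simp only [pvS]
      by_cases hlr : l ≤ r
      · rw [if_pos (show True ∧ l ≤ r ∧ r < n + 1 from ⟨trivial, hlr, by omega⟩),
            if_pos (show ((l : Int)) ≤ (r : Int) by exact_mod_cast hlr)]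
      · rw [if_neg (show ¬(True ∧ l ≤ r ∧ r < n + 1) by tauto),
            if_neg (show ¬((l : Int) ≤ (r : Int)) by exact_mod_cast hlr)]
    · split_ifs <;> first | rfl | omega
  rw [hG2]
  by_cases hq0 : n / l = 0
  · rw [hq0, show (((0 : Nat) : Int) + 1) = 1 from by norm_num,
        PySem.List.pyRange_one_eq_nil (by norm_num)]
    simp only [List.foldl_nil]
    rw [pvMk_row _ (le_refl n)]
    have hnl : n < l := (Nat.div_eq_zero_iff_lt (by omega)).mp hq0
    have : ((List.range (0 + 1)).map (pvG l 2 n)).sum = 0 := by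
      simp [pvG]
    rw [this]
    symm
    apply Finset.sum_eq_zero
    intro j hj
    apply pvS_eq_zero (by omega)
    have : n < (j + 1) * l := lt_of_lt_of_le hnl (Nat.le_mul_of_pos_left _ (by omega))
    exact_mod_cast this
  have L3 := pvA_loop3 (q := n / l) hl rfl (n / l + 1) (Nat.succ_le_succ (Nat.pos_of_ne_zero hq0)) (le_refl _)
  rw [show ((n / l + 1 : Nat) : Int) = ((n / l : Nat) : Int) + 1 from by push_cast; ring] at L3
  rw [L3, pvMk_row _ (le_refl n)]
  have hlist : ((List.range (n / l + 1)).map (pvG l (n / l + 1) n)).sum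
      = ∑ c' ∈ Finset.range (n / l + 1), pvG l (n / l + 1) n c' := rfl
  rw [hlist, Finset.sum_range_succ']
  have f0 : pvG l (n / l + 1) n 0 = 0 := by
    unfold pvG; split_ifs <;> first | rfl | omega
  rw [f0, add_zero]
  have hcongr : ∀ j ∈ Finset.range (n / l), pvG l (n / l + 1) n (j + 1) = pvS l (j + 1) (n : Int) := by
    intro j hj
    simp only [Finset.mem_range] at hj
    unfold pvG
    rw [if_pos (show 1 ≤ j + 1 ∧ j + 1 < n / l + 1 by omega)]
  rw [Finset.sum_congr rfl hcongr]
  apply pvT_pad hl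
  have h1 := Nat.div_add_mod n l
  have h2 := Nat.mod_lt n (show 0 < l by omega)
  have hlt : n < n / l * l + l := by
    rw [Nat.mul_comm] at h1
    generalize hv : n / l * l = v at h1 ⊢
    generalize hw : n % l = w at h1 h2
    omega
  have hfin : n < (n / l + 1) * l := by
    calc n < n / l * l + l := hlt
      _ = (n / l + 1) * l := by ring
  exact_mod_cast hfin

-- ===== VERDICT (by name: the statement is the Claim_ definition above) =====
theorem substitutions_using_tiles_of_one_color_spec : Claim_equal_substitutions_using_tiles_of_one_color := by
  intro t c _ hpre
  obtain ⟨ht, hc⟩ := hpre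
  unfold Spec_substitutions_using_tiles_of_one_color
  obtain ⟨n, rfl⟩ : ∃ n : Nat, t = (n : Int) := ⟨t.toNat, (Int.toNat_of_nonneg ht).symm⟩
  obtain ⟨l, rfl⟩ : ∃ l : Nat, c = (l : Int) := ⟨c.toNat, (Int.toNat_of_nonneg (by omega)).symm⟩
  have hl : 1 ≤ l := by exact_mod_cast hc
  rw [a_eq_pvT hl, alt_eq_pvF hl, pvF_eq_pvT hl]
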